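-- pv_equiv track=rewrite | github.com/matrxi999/Program_analysis_brainfuck | GTPtranspilerOptimiez.py | optimize_loops_after_clear_loop
-- ===== SOURCE A (Python) =====
-- def optimize_loops_after_clear_loop(sourcecode):
--     """Remove loops that immediately follow a [-] clear loop."""
--     i = 0
--     optimized_code = ""
--     while i < len(sourcecode):
--         if sourcecode[i:i+3] == '[-]':
--             optimized_code += '[-]'  # Mark the clear loop
--             i += 3
--             # Skip the loop that follows the clear loop
--             if i < len(sourcecode) and sourcecode[i] == '[':
--                 loop_depth = 1
--                 i += 1
--                 while i < len(sourcecode) and loop_depth > 0: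
--                     if sourcecode[i] == '[':
--                         loop_depth += 1
--                     elif sourcecode[i] == ']':
--                         loop_depth -= 1
--                     i += 1
--         else:
--             optimized_code += sourcecode[i]
--             i += 1
--
--     return optimized_code
-- ===== SOURCE B (Python) =====
-- def optimize_loops_after_clear_loop(sourcecode):
--     """Remove loops that immediately follow a [-] clear loop."""
--     n = len(sourcecode)
--     # Pass 1: jump table: index of each '[' -> index of its matching ']'
--     # (an unmatched '[' maps to n, so a skip runs to the end of the source).
--     table = {}
--     stack = []
--     for j, c in enumerate(sourcecode):
--         if c == '[':
--             stack.append(j)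
--         elif c == ']':
--             if stack:
--                 table[stack.pop()] = j
--     for j in stack:
--         table[j] = n
--     # Pass 2: walk the source, jumping over a loop that follows a clear loop.
--     out = []
--     i = 0
--     while i < n:
--         if sourcecode[i:i+3] == '[-]':
--             out.append('[-]')
--             i += 3
--             if i < n and sourcecode[i] == '[':
--                 i = table[i] + 1
--         else:
--             out.append(sourcecode[i])
--             i += 1
--     return ''.join(out)
-- ===== Notes on version B (the rewrite author's own statement) =====
-- stated objective: alternative
-- what changed: B precomputes a bracket-matching jump table with a stack in one pass and then walks the source once, replacing A's inner depth-counting skip loop by a direct table jump (unmatched '[' mapped to len so a skip runs to the end, as in A).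
import Mathlib
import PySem

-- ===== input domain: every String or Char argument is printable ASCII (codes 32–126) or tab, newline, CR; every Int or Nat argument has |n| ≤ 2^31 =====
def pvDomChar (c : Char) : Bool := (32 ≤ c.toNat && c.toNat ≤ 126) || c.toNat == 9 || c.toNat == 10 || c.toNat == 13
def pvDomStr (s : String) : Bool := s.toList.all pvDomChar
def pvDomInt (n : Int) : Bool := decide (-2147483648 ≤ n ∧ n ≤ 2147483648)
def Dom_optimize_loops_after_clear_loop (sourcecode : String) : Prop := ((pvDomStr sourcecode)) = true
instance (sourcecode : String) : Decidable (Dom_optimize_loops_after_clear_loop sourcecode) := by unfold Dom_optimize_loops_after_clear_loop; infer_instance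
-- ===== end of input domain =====

-- B replaces A's inner depth-counting skip loop by a precomputed bracket-matching jump table
-- built with a stack in a first pass (alternative decomposition; same return value).

-- ===== PORT A =====

-- A's inner `while i < len and loop_depth > 0` skip loop, over the suffix; returns the rest.
def skipA (depth : Nat) : List Char → List Char
  | [] => []
  | c :: t =>
    let d := if c = '[' then depth + 1 else if c = ']' then depth - 1 else depth
    if 0 < d then skipA d t else t

-- termination helper for the port (cited in decreasing_by)
theorem skipA_length_le (depth : Nat) (t : List Char) : (skipA depth t).length ≤ t.length := by
  induction t generalizing depth with
  | nil => simp [skipA]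
  | cons c t ih =>
    simp only [skipA]
    split_ifs <;> first | exact le_trans (ih _) (Nat.le_succ _) | exact Nat.le_succ _

-- A's outer while loop over the suffix (i < len ↔ suffix nonempty; s[i:i+3] == '[-]' ↔ first
-- three chars are '[','-',']'; the `if s[i] == '['` check is the fourth pattern line).
def optALoop : List Char → List Char
  | '[' :: '-' :: ']' :: '[' :: t => '[' :: '-' :: ']' :: optALoop (skipA 1 t)
  | '[' :: '-' :: ']' :: r => '[' :: '-' :: ']' :: optALoop r
  | c :: rest => c :: optALoop rest
  | [] => []
termination_by l => l.length
decreasing_by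
  · have := skipA_length_le 1 t; simp; omega
  all_goals first | (simp; omega) | simp

def optimize_loops_after_clear_loop (sourcecode : String) : String :=
  String.ofList (optALoop sourcecode.toList)

-- ===== PORT B =====

-- pass 1 of Source B: one scan with a stack builds the '[' → matching ']' table; at the end every
-- unmatched '[' (bottom of the stack first, i.e. the reversed Lean stack) maps to n.
def buildTbl (n : Nat) : List Char → Nat → List Nat → PySem.Dict Nat Nat → PySem.Dict Nat Nat
  | [], _, st, tbl => (st.reverse).foldl (fun t q => t.insert q n) tbl
  | c :: u, j, st, tbl =>
    if c = '[' then buildTbl n u (j + 1) (j :: st) tbl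
    else if c = ']' then
      match st with
      | q :: st' => buildTbl n u (j + 1) st' (tbl.insert q j)
      | [] => buildTbl n u (j + 1) [] tbl
    else buildTbl n u (j + 1) st tbl

-- pass 2 of Source B: the `while i < n` walk; `s[i:i+3]` is take 3 of drop i, `i' < n and s[i'] == '['`
-- is head? of drop i' = some '['; table lookup via getD (the key is always present in Source B, so
-- getD computes exactly the Source B lookup). fuel ≥ iteration count (i strictly grows each step).
def pass2 (s : List Char) (n : Nat) (tbl : PySem.Dict Nat Nat) : Nat → Nat → List Char
  | 0, _ => []
  | fuel + 1, i =>
    if i < n then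
      if (s.drop i).take 3 = ['[', '-', ']'] then
        if (s.drop (i + 3)).head? = some '[' then
          '[' :: '-' :: ']' :: pass2 s n tbl fuel (tbl.getD (i + 3) n + 1)
        else
          '[' :: '-' :: ']' :: pass2 s n tbl fuel (i + 3)
      else
        match (s.drop i).head? with
        | some c => c :: pass2 s n tbl fuel (i + 1)
        | none => []
    else []

-- (cs = list of the source's chars, n = its length, fuel n+1 ≥ the number of loop iterations)
def optimize_loops_after_clear_loop_alt (sourcecode : String) : String :=
  String.ofList (pass2 sourcecode.toList sourcecode.toList.length
    (buildTbl sourcecode.toList.length sourcecode.toList 0 [] PySem.Dict.empty)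
    (sourcecode.toList.length + 1) 0)

-- ===== PRECONDITION & SPEC =====
def Spec_optimize_loops_after_clear_loop (sourcecode : String) (out : String) : Prop := out = optimize_loops_after_clear_loop_alt sourcecode
instance (sourcecode : String) (out : String) : Decidable (Spec_optimize_loops_after_clear_loop sourcecode out) := by unfold Spec_optimize_loops_after_clear_loop; infer_instance

-- ===== CLAIM (what is proved, stated in full; the proofs are below) =====
def Claim_equal_optimize_loops_after_clear_loop : Prop := ∀ (sourcecode : String), Dom_optimize_loops_after_clear_loop sourcecode → Spec_optimize_loops_after_clear_loop sourcecode (optimize_loops_after_clear_loop sourcecode)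

-- ===== LEMMAS AND PROOFS =====

-- the depth scan of A's skip loop, instrumented to report the absolute index where depth hits 0
def scanM : Nat → Nat → List Char → Option Nat
  | _, _, [] => none
  | d, j, c :: u =>
    let d' := if c = '[' then d + 1 else if c = ']' then d - 1 else d
    if 0 < d' then scanM d' (j + 1) u else some j

-- the value the table must hold: the close position, or n when the scan runs off the end
def cls (k j : Nat) (u : List Char) (n : Nat) : Nat :=
  match scanM k j u with
  | some q => q
  | none => n

theorem scanM_ge : ∀ (u : List Char) (d j q : Nat), scanM d j u = some q → j ≤ q := by
  intro u
  induction u with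
  | nil => intro d j q h; simp [scanM] at h
  | cons c u ih =>
    intro d j q h
    simp only [scanM] at h
    split_ifs at h <;>
      first
        | exact le_trans (Nat.le_succ j) (ih _ _ _ h)
        | (injection h with h; omega)

theorem skipA_eq_scanM : ∀ (u : List Char) (d j : Nat), 0 < d →
    skipA d u = (match scanM d j u with
                 | some q => u.drop (q + 1 - j)
                 | none => ([] : List Char)) := by
  intro u
  induction u with
  | nil => intro d j hd; simp [skipA, scanM]
  | cons c u ih =>
    intro d j hd
    simp only [skipA, scanM]
    by_cases h : 0 < (if c = '[' then d + 1 else if c = ']' then d - 1 else d)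
    · simp only [h, if_true]
      rw [ih _ (j + 1) h]
      cases hs : scanM (if c = '[' then d + 1 else if c = ']' then d - 1 else d) (j + 1) u with
      | none => simp
      | some q =>
        have hq := scanM_ge _ _ _ _ hs
        have h1 : q + 1 - j = (q + 1 - (j + 1)) + 1 := by omega
        simp only [h1, List.drop_succ_cons]
    · simp only [h, if_false]
      have h1 : j + 1 - j = 1 := by omega
      simp [h1]


theorem getD_foldl_insert_const (l : List Nat) (tbl : PySem.Dict Nat Nat) (n p d : Nat) :
    (l.foldl (fun t q => t.insert q n) tbl).getD p d = if p ∈ l then n else tbl.getD p d := by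
  induction l generalizing tbl with
  | nil => simp
  | cons a l ih =>
    simp only [List.foldl_cons, ih, PySem.Dict.getD_insert, List.mem_cons]
    by_cases hp : p ∈ l
    · simp [hp]
    · by_cases hpa : p = a <;> simp [hp, hpa]

-- invariant of Source B's first pass: open brackets and recorded keys lie left of the cursor,
-- the stack is duplicate-free and disjoint from the recorded keys
def BInv (j : Nat) (st : List Nat) (tbl : PySem.Dict Nat Nat) : Prop :=
  (∀ q ∈ st, q < j) ∧ (∀ k ∈ tbl.keys, k < j) ∧ st.Nodup ∧ (∀ q ∈ st, q ∉ tbl.keys)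

theorem cls_nil (k j n : Nat) : cls k j [] n = n := rfl

theorem cls_cons_open (k j n : Nat) (u : List Char) :
    cls k j ('[' :: u) n = cls (k + 1) (j + 1) u n := by
  simp [cls, scanM]

theorem cls_cons_close (k j n : Nat) (u : List Char) (hk : 0 < k) :
    cls (k + 1) j (']' :: u) n = cls k (j + 1) u n := by
  simp [cls, scanM, hk]

theorem cls_cons_close_one (j n : Nat) (u : List Char) : cls 1 j (']' :: u) n = j := by
  simp [cls, scanM]

theorem cls_cons_other (c : Char) (k j n : Nat) (u : List Char)
    (h1 : c ≠ '[') (h2 : c ≠ ']') (hk : 0 < k) :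
    cls k j (c :: u) n = cls k (j + 1) u n := by
  simp [cls, scanM, h1, h2, hk]

theorem build_getD : ∀ (u : List Char) (n j : Nat) (st : List Nat) (tbl : PySem.Dict Nat Nat),
    BInv j st tbl →
    ((∀ p d, p ∈ st → (buildTbl n u j st tbl).getD p d = cls (st.idxOf p + 1) j u n) ∧
     (∀ p d, p ∈ tbl.keys → (buildTbl n u j st tbl).getD p d = tbl.getD p d) ∧
     (∀ v w d, u = v ++ '[' :: w →
        (buildTbl n u j st tbl).getD (j + v.length) d = cls 1 (j + v.length + 1) w n)) := by
  intro u
  induction u with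
  | nil =>
    intro n j st tbl hInv
    refine ⟨?_, ?_, ?_⟩
    · intro p d hp
      simp only [buildTbl]
      rw [getD_foldl_insert_const]
      simp [List.mem_reverse, hp, cls_nil]
    · intro p d hp
      have hns : p ∉ st := fun hps => hInv.2.2.2 p hps hp
      simp only [buildTbl]
      rw [getD_foldl_insert_const]
      simp [List.mem_reverse, hns]
    · intro v w d hvw
      simp at hvw
  | cons c u ih =>
    intro n j st tbl hInv
    obtain ⟨hlt, hkeys, hnodup, hdisj⟩ := hInv
    by_cases hc : c = '['
    · subst hc
      have hInv' : BInv (j + 1) (j :: st) tbl := by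
        refine ⟨?_, fun k hk => Nat.lt_succ_of_lt (hkeys k hk), ?_, ?_⟩
        · intro q hq
          rcases List.mem_cons.mp hq with h | h
          · omega
          · exact Nat.lt_succ_of_lt (hlt q h)
        · exact List.nodup_cons.mpr ⟨fun hj => absurd (hlt j hj) (lt_irrefl j), hnodup⟩
        · intro q hq
          rcases List.mem_cons.mp hq with h | h
          · subst h; exact fun hk => absurd (hkeys q hk) (lt_irrefl q)
          · exact hdisj q h
      obtain ⟨ih1, ih2, ih3⟩ := ih n (j + 1) (j :: st) tbl hInv'
      have hstep : buildTbl n ('[' :: u) j st tbl = buildTbl n u (j + 1) (j :: st) tbl := by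
        simp [buildTbl]
      refine ⟨?_, ?_, ?_⟩
      · intro p d hp
        have hpj : p ≠ j := fun he => absurd (he ▸ hlt p hp) (lt_irrefl j)
        rw [hstep, ih1 p d (List.mem_cons_of_mem _ hp), cls_cons_open,
          List.idxOf_cons_ne _ (Ne.symm hpj)]
      · intro p d hp
        rw [hstep, ih2 p d hp]
      · intro v w d hvw
        cases v with
        | nil =>
          simp only [List.nil_append, List.cons.injEq] at hvw
          have := ih1 j d List.mem_cons_self
          rw [List.idxOf_cons_eq _ rfl] at this
          rw [hstep]
          simpa [hvw.2] using this
        | cons a v' =>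
          simp only [List.cons_append, List.cons.injEq] at hvw
          have hidx : j + (a :: v').length = j + 1 + v'.length := by simp; omega
          rw [hstep, hidx]
          exact ih3 v' w d hvw.2
    · by_cases hc2 : c = ']'
      · subst hc2
        cases st with
        | nil =>
          have hInv' : BInv (j + 1) [] tbl :=
            ⟨by simp, fun k hk => Nat.lt_succ_of_lt (hkeys k hk), List.nodup_nil, by simp⟩
          obtain ⟨ih1, ih2, ih3⟩ := ih n (j + 1) [] tbl hInv'
          have hstep : buildTbl n (']' :: u) j [] tbl = buildTbl n u (j + 1) [] tbl := by
            simp [buildTbl]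
          refine ⟨?_, ?_, ?_⟩
          · intro p d hp
            simp at hp
          · intro p d hp
            rw [hstep, ih2 p d hp]
          · intro v w d hvw
            cases v with
            | nil => simp at hvw
            | cons a v' =>
              simp only [List.cons_append, List.cons.injEq] at hvw
              have hidx : j + (a :: v').length = j + 1 + v'.length := by simp; omega
              rw [hstep, hidx]
              exact ih3 v' w d hvw.2
        | cons q st' =>
          have hqlt : q < j := hlt q List.mem_cons_self
          have hqkeys : q ∉ tbl.keys := hdisj q List.mem_cons_self
          have hqst : q ∉ st' := (List.nodup_cons.mp hnodup).1
          have hInv' : BInv (j + 1) st' (tbl.insert q j) := by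
            refine ⟨fun q' hq' => Nat.lt_succ_of_lt (hlt q' (List.mem_cons_of_mem _ hq')),
              ?_, (List.nodup_cons.mp hnodup).2, ?_⟩
            · intro k hk
              rcases (PySem.Dict.mem_keys_insert _ _ _ _).mp hk with h | h
              · omega
              · exact Nat.lt_succ_of_lt (hkeys k h)
            · intro q' hq' hk
              rcases (PySem.Dict.mem_keys_insert _ _ _ _).mp hk with h | h
              · exact hqst (h ▸ hq')
              · exact hdisj q' (List.mem_cons_of_mem _ hq') h
          obtain ⟨ih1, ih2, ih3⟩ := ih n (j + 1) st' (tbl.insert q j) hInv'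
          have hstep : buildTbl n (']' :: u) j (q :: st') tbl
              = buildTbl n u (j + 1) st' (tbl.insert q j) := by
            simp [buildTbl]
          refine ⟨?_, ?_, ?_⟩
          · intro p d hp
            by_cases hpq : p = q
            · subst hpq
              have hk : p ∈ (tbl.insert p j).keys := (PySem.Dict.mem_keys_insert _ _ _ _).mpr (Or.inl rfl)
              rw [hstep, ih2 p d hk, PySem.Dict.getD_insert, List.idxOf_cons_eq _ rfl,
                cls_cons_close_one]
              simp
            · have hp' : p ∈ st' := (List.mem_cons.mp hp).resolve_left hpq
              rw [hstep, ih1 p d hp', List.idxOf_cons_ne _ (Ne.symm hpq),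
                Nat.succ_eq_add_one, cls_cons_close _ _ _ _ (Nat.succ_pos _)]
          · intro p d hp
            have hpq : p ≠ q := fun he => hqkeys (he ▸ hp)
            have hk : p ∈ (tbl.insert q j).keys := (PySem.Dict.mem_keys_insert _ _ _ _).mpr (Or.inr hp)
            rw [hstep, ih2 p d hk, PySem.Dict.getD_insert]
            simp [hpq]
          · intro v w d hvw
            cases v with
            | nil => simp at hvw
            | cons a v' =>
              simp only [List.cons_append, List.cons.injEq] at hvw
              have hidx : j + (a :: v').length = j + 1 + v'.length := by simp; omega
              rw [hstep, hidx]
              exact ih3 v' w d hvw.2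
      · have hInv' : BInv (j + 1) st tbl :=
          ⟨fun q hq => Nat.lt_succ_of_lt (hlt q hq),
           fun k hk => Nat.lt_succ_of_lt (hkeys k hk), hnodup, hdisj⟩
        obtain ⟨ih1, ih2, ih3⟩ := ih n (j + 1) st tbl hInv'
        have hstep : buildTbl n (c :: u) j st tbl = buildTbl n u (j + 1) st tbl := by
          simp [buildTbl, hc, hc2]
        refine ⟨?_, ?_, ?_⟩
        · intro p d hp
          rw [hstep, ih1 p d hp, cls_cons_other c _ _ _ _ hc hc2 (Nat.succ_pos _)]
        · intro p d hp
          rw [hstep, ih2 p d hp]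
        · intro v w d hvw
          cases v with
          | nil => simp only [List.nil_append, List.cons.injEq] at hvw; exact absurd hvw.1 hc
          | cons a v' =>
            simp only [List.cons_append, List.cons.injEq] at hvw
            have hidx : j + (a :: v').length = j + 1 + v'.length := by simp; omega
            rw [hstep, hidx]
            exact ih3 v' w d hvw.2

theorem table_getD (s : List Char) (p : Nat) (w : List Char) (h : s.drop p = '[' :: w) (d : Nat) :
    (buildTbl s.length s 0 [] PySem.Dict.empty).getD p d = cls 1 (p + 1) w s.length := by
  have hp : p < s.length := by
    have hne : s.drop p ≠ [] := by rw [h]; simp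
    rw [ne_eq, List.drop_eq_nil_iff] at hne
    omega
  have hs : s = s.take p ++ '[' :: w := by
    have h1 := List.take_append_drop p s
    rw [h] at h1
    exact h1.symm
  have hInv : BInv 0 [] PySem.Dict.empty := ⟨by simp, by simp, List.nodup_nil, by simp⟩
  have h3 := (build_getD s s.length 0 [] PySem.Dict.empty hInv).2.2 (s.take p) w d hs
  have hl : (s.take p).length = p := by rw [List.length_take]; omega
  rw [hl] at h3
  simpa using h3

theorem pass2_nil (s : List Char) (n : Nat) (tbl : PySem.Dict Nat Nat) (fuel i : Nat)
    (h : n ≤ i) : pass2 s n tbl fuel i = [] := by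
  cases fuel with
  | zero => simp [pass2]
  | succ fuel => simp [pass2, Nat.not_lt.mpr h]

theorem optALoop_clear_jump (t : List Char) :
    optALoop ('[' :: '-' :: ']' :: '[' :: t) = '[' :: '-' :: ']' :: optALoop (skipA 1 t) := by
  rw [optALoop]

theorem optALoop_nil : optALoop [] = [] := by rw [optALoop]

theorem optALoop_clear_end : optALoop ['[', '-', ']'] = ['[', '-', ']'] := by
  rw [optALoop.eq_def]
  split <;> try simp_all [optALoop_nil]
  all_goals (rename_i hno heq; exact ((hno _ heq.1.symm) heq.2.symm).elim)

theorem optALoop_clear_nojump (c : Char) (t : List Char) (h : c ≠ '[') :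
    optALoop ('[' :: '-' :: ']' :: c :: t) = '[' :: '-' :: ']' :: optALoop (c :: t) := by
  rw [optALoop.eq_def]
  split <;> try simp_all
  all_goals (rename_i hno heq; exact ((hno _ heq.1.symm) heq.2.symm).elim)

theorem optALoop_not_clear (c : Char) (rest : List Char)
    (h : (c :: rest).take 3 ≠ ['[', '-', ']']) :
    optALoop (c :: rest) = c :: optALoop rest := by
  rw [optALoop.eq_def]
  split <;> simp_all

theorem pass2_eq (fuel : Nat) : ∀ (i : Nat) (s : List Char), s.length ≤ fuel + i →
    pass2 s s.length (buildTbl s.length s 0 [] PySem.Dict.empty) fuel i = optALoop (s.drop i) := by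
  induction fuel with
  | zero =>
    intro i s h
    have hnil : s.drop i = [] := List.drop_eq_nil_of_le (by omega)
    simp [pass2, hnil, optALoop_nil]
  | succ fuel ih =>
    intro i s h
    by_cases hin : i < s.length
    · by_cases h3 : (s.drop i).take 3 = ['[', '-', ']']
      · have hsplit : s.drop i = '[' :: '-' :: ']' :: s.drop (i + 3) := by
          conv_lhs => rw [← List.take_append_drop 3 (s.drop i)]
          rw [h3, List.drop_drop]
          rfl
        cases hh : (s.drop (i + 3)).head? with
        | none =>
          have hnil : s.drop (i + 3) = [] := by
            cases hcase : s.drop (i + 3) <;> simp_all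
          have hlen : s.length ≤ i + 3 := by
            by_contra hlt
            rw [List.drop_eq_nil_iff] at hnil
            omega
          rw [pass2]
          simp only [hin, if_true, h3, if_true, hh]
          rw [hsplit, hnil, optALoop_clear_end]
          simp only [reduceCtorEq, if_false]
          rw [pass2_nil _ _ _ _ _ hlen]
        | some c' =>
          have hcons : s.drop (i + 3) = c' :: s.drop (i + 4) := by
            cases hcase : s.drop (i + 3) with
            | nil => simp [hcase] at hh
            | cons a t =>
              have ht : t = s.drop (i + 4) := by
                have h1 := congrArg List.tail hcase
                simpa [List.tail_drop] using h1.symm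
              rw [hcase] at hh
              simp only [List.head?_cons, Option.some.injEq] at hh
              rw [hh, ht]
          by_cases hbr : c' = '['
          · subst hbr
            have htab := table_getD s (i + 3) (s.drop (i + 4)) hcons s.length
            rw [pass2]
            simp only [hin, if_true, h3, if_true, hh]
            rw [htab, hsplit, hcons, optALoop_clear_jump]
            have hskip := skipA_eq_scanM (s.drop (i + 4)) 1 (i + 4) (by omega)
            cases hscan : scanM 1 (i + 4) (s.drop (i + 4)) with
            | none =>
              rw [hscan] at hskip
              simp only [] at hskip
              rw [hskip, optALoop_nil]
              simp only [cls, hscan]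
              rw [pass2_nil _ _ _ _ _ (by omega)]
            | some q =>
              have hq := scanM_ge _ _ _ _ hscan
              rw [hscan] at hskip
              simp only [] at hskip
              simp only [cls, hscan]
              rw [hskip, List.drop_drop]
              have harith : i + 4 + (q + 1 - (i + 4)) = q + 1 := by omega
              rw [harith, ih (q + 1) s (by omega)]
          · rw [pass2]
            simp only [hin, if_true, h3, if_true, hh, Option.some.injEq, hbr, if_false]
            rw [hsplit, hcons, optALoop_clear_nojump _ _ hbr, ← hcons,
              ih (i + 3) s (by omega)]
      · have hne : s.drop i ≠ [] := by
          rw [ne_eq, List.drop_eq_nil_iff]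
          omega
        cases hcase : s.drop i with
        | nil => exact absurd hcase hne
        | cons c rest =>
          have hrest : rest = s.drop (i + 1) := by
            have h1 := congrArg List.tail hcase
            simpa [List.tail_drop] using h1.symm
          subst hrest
          rw [pass2, hcase]
          rw [hcase] at h3
          simp only [hin, if_true, List.head?_cons, if_neg h3]
          rw [optALoop_not_clear _ _ h3, ih (i + 1) s (by omega)]
    · have hnil : s.drop i = [] := List.drop_eq_nil_of_le (by omega)
      rw [pass2]
      simp [hin, hnil, optALoop_nil]
-- ===== VERDICT (by name: the statement is the Claim_ definition above) =====
theorem optimize_loops_after_clear_loop_spec : Claim_equal_optimize_loops_after_clear_loop := by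
  intro s _
  unfold Spec_optimize_loops_after_clear_loop optimize_loops_after_clear_loop
    optimize_loops_after_clear_loop_alt
  have h := pass2_eq (s.toList.length + 1) 0 s.toList (by omega)
  simp only [List.drop_zero] at h
  rw [h]
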